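-- pv_equiv track=rewrite | github.com/lyteabovenyte/Algorithms | Algorithms/Arrays/variant-partition_based_on_keys.py | partition_based_on_key
-- ===== SOURCE A (Python) =====
-- def partition_based_on_key(d):
--     l = list(d) # getting the list of the keys
--     sorted_l = sorted(l) # sorting the keys
--     pivot = sorted_l[len(l) // 2] # getting the pivot -> pivot is the median of the keys, to be in middle.
--     smaller, equal, larger = 0, 0, len(l)
--     while equal < larger:
--         if pivot > l[equal]:
--             l[equal], l[smaller] = l[smaller], l[equal]
--             smaller, equal = smaller + 1, equal + 1
--         elif pivot == l[equal]:
--             equal += 1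
--         else:
--             larger -= 1
--             l[larger], l[equal] = l[equal], l[larger]
--
--     return(l)
-- ===== SOURCE B (Python) =====
-- def partition_based_on_key(d):
--     l = list(d)
--
--     def kth_smallest(xs, k):
--         # deterministic quickselect: k-th smallest value without fully sorting
--         pivot = xs[len(xs) // 2]
--         lows = [x for x in xs if x < pivot]
--         highs = [x for x in xs if x > pivot]
--         if k < len(lows):
--             return kth_smallest(lows, k)
--         if k >= len(xs) - len(highs):
--             return kth_smallest(highs, k - (len(xs) - len(highs)))
--         return pivot
--
--     pivot = kth_smallest(l, len(l) // 2)
--     smaller, equal, larger = 0, 0, len(l)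
--     while equal < larger:
--         if pivot > l[equal]:
--             l[equal], l[smaller] = l[smaller], l[equal]
--             smaller, equal = smaller + 1, equal + 1
--         elif pivot == l[equal]:
--             equal += 1
--         else:
--             larger -= 1
--             l[larger], l[equal] = l[equal], l[larger]
--     return l
-- ===== Notes on version B (the rewrite author's own statement) =====
-- stated objective: alternative
-- what changed: The pivot (median key) is found by a deterministic quickselect (recursive three-way partition, expected linear time) instead of fully sorting the keys; the Dutch-flag partition pass is kept; Pre_ excludes only the empty dict, on which A raises IndexError.
import Mathlib
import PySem

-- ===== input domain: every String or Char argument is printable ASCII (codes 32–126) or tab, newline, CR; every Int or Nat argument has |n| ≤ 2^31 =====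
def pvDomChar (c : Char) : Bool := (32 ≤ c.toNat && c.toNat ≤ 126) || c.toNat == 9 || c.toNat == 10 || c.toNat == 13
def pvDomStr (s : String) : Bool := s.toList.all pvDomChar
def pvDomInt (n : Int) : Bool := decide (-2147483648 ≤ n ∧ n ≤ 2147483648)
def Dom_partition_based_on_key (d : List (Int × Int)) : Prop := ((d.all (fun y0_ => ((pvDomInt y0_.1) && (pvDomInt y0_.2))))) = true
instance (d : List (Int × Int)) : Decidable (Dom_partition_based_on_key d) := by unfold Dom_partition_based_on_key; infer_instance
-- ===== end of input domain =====

-- B finds the pivot (median key) by quickselect instead of sorting all the keys,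
-- then runs the same Dutch-flag partition pass (objective: alternative).

-- ===== PORT A =====
-- A's while loop: l mutated in place, three indices
def partAloop (l : List Int) (pivot : Int) (smaller equal larger : Nat) : List Int :=
  if _h : equal < larger then
    if pivot > l.getD equal 0 then
      -- l[equal], l[smaller] = l[smaller], l[equal]
      partAloop ((l.set equal (l.getD smaller 0)).set smaller (l.getD equal 0)) pivot (smaller + 1) (equal + 1) larger
    else if pivot = l.getD equal 0 then
      partAloop l pivot smaller (equal + 1) larger
    else
      -- larger -= 1 ; l[larger], l[equal] = l[equal], l[larger]
      partAloop ((l.set (larger - 1) (l.getD equal 0)).set equal (l.getD (larger - 1) 0)) pivot smaller equal (larger - 1)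
  else l
termination_by larger - equal
decreasing_by all_goals omega

def partition_based_on_key (d : List (Int × Int)) : List Int :=
  let l := PySem.List.dedup (d.map (fun p => p.1))        -- l = list(d): the dict's keys
  let sorted_l := PySem.List.sorted l (fun x => x) false
  match PySem.List.pyGet? sorted_l (PySem.Int.floordiv (l.length : Int) 2) with
  | none => []                                            -- IndexError (empty dict); excluded by Pre_
  | some pivot => partAloop l pivot 0 0 l.length

-- ===== PORT B =====
-- Source B's kth_smallest: deterministic quickselect
def kthSmallest (xs : List Int) (k : Nat) : Int :=
  match _hp : PySem.List.pyGet? xs (PySem.Int.floordiv (xs.length : Int) 2) with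
  | none => 0                                             -- Python raises IndexError here (xs empty); never reached from the calls made
  | some pivot =>
    let lows := xs.filter (fun x => x < pivot)
    let highs := xs.filter (fun x => pivot < x)
    if _h1 : k < lows.length then
      kthSmallest lows k
    else if _h2 : xs.length - highs.length ≤ k then
      kthSmallest highs (k - (xs.length - highs.length))
    else
      pivot
termination_by xs.length
decreasing_by
  · have hmem : pivot ∈ xs := PySem.List.mem_of_pyGet?_eq_some xs _hp
    have h : (xs.filter (fun x => decide (x < pivot))).length < xs.length :=
      List.length_filter_lt_length_iff_exists.mpr ⟨pivot, hmem, by simp⟩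
    rw [List.filter_attach xs (fun x => decide (x < pivot))]
    simpa using h
  · have hmem : pivot ∈ xs := PySem.List.mem_of_pyGet?_eq_some xs _hp
    have h : (xs.filter (fun x => decide (pivot < x))).length < xs.length :=
      List.length_filter_lt_length_iff_exists.mpr ⟨pivot, hmem, by simp⟩
    rw [List.filter_attach xs (fun x => decide (pivot < x))]
    simpa using h

-- Source B's while loop (same Dutch-flag pass as A's)
def partBloop (l : List Int) (pivot : Int) (smaller equal larger : Nat) : List Int :=
  if _h : equal < larger then
    if pivot > l.getD equal 0 then
      partBloop ((l.set equal (l.getD smaller 0)).set smaller (l.getD equal 0)) pivot (smaller + 1) (equal + 1) larger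
    else if pivot = l.getD equal 0 then
      partBloop l pivot smaller (equal + 1) larger
    else
      partBloop ((l.set (larger - 1) (l.getD equal 0)).set equal (l.getD (larger - 1) 0)) pivot smaller equal (larger - 1)
  else l
termination_by larger - equal
decreasing_by all_goals omega

def partition_based_on_key_alt (d : List (Int × Int)) : List Int :=
  let l := PySem.List.dedup (d.map (fun p => p.1))
  let pivot := kthSmallest l (l.length / 2)
  partBloop l pivot 0 0 l.length

-- ===== PRECONDITION & SPEC =====
-- A raises IndexError on the empty dict (sorted_l[0] of an empty list); Pre_ excludes exactly that.
def Pre_partition_based_on_key (d : List (Int × Int)) : Prop := d ≠ []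
instance (d : List (Int × Int)) : Decidable (Pre_partition_based_on_key d) := by
  unfold Pre_partition_based_on_key; infer_instance
def pvWitness_partition_based_on_key : (List (Int × Int)) := [(3, 0), (1, 5), (2, 7)]

def Spec_partition_based_on_key (d : List (Int × Int)) (out : List Int) : Prop :=
  out = partition_based_on_key_alt d
instance (d : List (Int × Int)) (out : List Int) : Decidable (Spec_partition_based_on_key d out) := by
  unfold Spec_partition_based_on_key; infer_instance

-- ===== CLAIM (what is proved, stated in full; the proofs are below) =====
def Claim_equal_partition_based_on_key : Prop :=
  ∀ (d : List (Int × Int)), Dom_partition_based_on_key d → Pre_partition_based_on_key d →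
    Spec_partition_based_on_key d (partition_based_on_key d)

-- ===== LEMMAS AND PROOFS =====

-- the two Dutch-flag loops are the same function
lemma loops_eq : ∀ (n : Nat) (l : List Int) (pivot : Int) (s e g : Nat), g - e = n →
    partAloop l pivot s e g = partBloop l pivot s e g := by
  intro n
  induction n using Nat.strong_induction_on with
  | _ n ih =>
    intro l pivot s e g hn
    rw [partAloop, partBloop]
    by_cases h : e < g
    · simp only [dif_pos h]
      split_ifs with h1 h2
      · exact ih (g - (e + 1)) (by omega) _ pivot _ _ _ rfl
      · exact ih (g - (e + 1)) (by omega) _ pivot _ _ _ rfl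
      · exact ih (g - 1 - e) (by omega) _ pivot _ _ _ rfl
    · simp only [dif_neg h]

-- either program's pivot read on a nonempty list
lemma pyGet_half (xs : List Int) (h : xs ≠ []) :
    PySem.List.pyGet? xs (PySem.Int.floordiv (xs.length : Int) 2)
      = some (xs.getD (xs.length / 2) 0) := by
  have h2 : (2 : Int) = ((2 : Nat) : Int) := by norm_cast
  rw [h2, PySem.Int.floordiv_natCast, PySem.List.pyGet?_natCast]
  have hlt : xs.length / 2 < xs.length := by
    have : 0 < xs.length := List.length_pos_iff.mpr h
    omega
  rw [List.getElem?_eq_getElem hlt, List.getD_eq_getElem xs 0 hlt]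

-- quickselect computes the k-th element of the sorted list
lemma kth_eq : ∀ (n : Nat) (xs : List Int) (k : Nat), xs.length = n → k < xs.length →
    kthSmallest xs k = (PySem.List.sorted xs (fun x => x) false).getD k 0 := by
  intro n
  induction n using Nat.strong_induction_on with
  | _ n ih =>
    intro xs k hn hk
    have hne : xs ≠ [] := by intro h; subst h; simp at hk
    have hpg := pyGet_half xs hne
    rw [kthSmallest, hpg]
    dsimp only
    set p := xs.getD (xs.length / 2) 0 with hpdef
    set lows := xs.filter (fun x => decide (x < p)) with hlowdef
    set highs := xs.filter (fun x => decide (p < x)) with hhighdef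
    have hmiddef : ∀ x ∈ xs.filter (fun x => decide (x = p)), x = p := by
      intro x hx
      exact of_decide_eq_true (List.mem_filter.mp hx).2
    set mids := xs.filter (fun x => decide (x = p)) with hmidset
    have hpm : p ∈ xs := by
      have hl2 : xs.length / 2 < xs.length := by
        have : 0 < xs.length := List.length_pos_iff.mpr hne
        omega
      rw [hpdef, List.getD_eq_getElem xs 0 hl2]
      exact List.getElem_mem hl2
    have hlowlt : lows.length < xs.length := by
      rw [hlowdef]
      exact List.length_filter_lt_length_iff_exists.mpr ⟨p, hpm, by simp⟩
    have hhighlt : highs.length < xs.length := by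
      rw [hhighdef]
      exact List.length_filter_lt_length_iff_exists.mpr ⟨p, hpm, by simp⟩
    -- permutation decomposition of xs into lows ++ mids ++ highs
    have hmh : (mids ++ highs).Perm (xs.filter (fun x => !decide (x < p))) := by
      have h1 : mids = (xs.filter (fun x => !decide (x < p))).filter (fun x => decide (x = p)) := by
        rw [List.filter_filter, hmidset]
        apply List.filter_congr
        intro x _
        by_cases hx : x = p <;> simp [hx]
      have h2 : highs = (xs.filter (fun x => !decide (x < p))).filter (fun x => !decide (x = p)) := by
        rw [List.filter_filter, hhighdef]
        apply List.filter_congr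
        intro x _
        by_cases hx : x = p
        · simp [hx]
        · by_cases hx2 : x < p <;> simp [hx, hx2] <;> omega
      rw [h1, h2]
      exact List.filter_append_perm _ _
    have hperm : (lows ++ (mids ++ highs)).Perm xs :=
      (List.Perm.append_left lows hmh).trans
        (by rw [hlowdef]; exact List.filter_append_perm _ xs)
    have hperm2 : ((PySem.List.sorted lows (fun x => x) false) ++
        (mids ++ (PySem.List.sorted highs (fun x => x) false))).Perm xs :=
      ((PySem.List.sorted_perm lows (fun x => x) false).append
        ((List.Perm.refl mids).append (PySem.List.sorted_perm highs (fun x => x) false))).trans hperm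
    -- the concatenation is ordered
    have hlowmem : ∀ x ∈ PySem.List.sorted lows (fun x => x) false, x < p := by
      intro x hx
      have := (PySem.List.mem_sorted lows (fun x => x) false x).mp hx
      rw [hlowdef] at this
      exact of_decide_eq_true (List.mem_filter.mp this).2
    have hhighmem : ∀ x ∈ PySem.List.sorted highs (fun x => x) false, p < x := by
      intro x hx
      have := (PySem.List.mem_sorted highs (fun x => x) false x).mp hx
      rw [hhighdef] at this
      exact of_decide_eq_true (List.mem_filter.mp this).2
    have hpw : List.Pairwise (fun a b => a ≤ b)
        ((PySem.List.sorted lows (fun x => x) false) ++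
          (mids ++ (PySem.List.sorted highs (fun x => x) false))) := by
      rw [List.pairwise_append]
      refine ⟨PySem.List.sorted_pairwise lows (fun x => x), ?_, ?_⟩
      · rw [List.pairwise_append]
        refine ⟨?_, PySem.List.sorted_pairwise highs (fun x => x), ?_⟩
        · exact List.pairwise_of_forall_mem_list (fun a ha b hb => by
            rw [hmiddef a ha, hmiddef b hb])
        · intro a ha b hb
          rw [hmiddef a ha]
          exact le_of_lt (hhighmem b hb)
      · intro a ha b hb
        have ha' := hlowmem a ha
        rcases List.mem_append.mp hb with hb | hb
        · rw [hmiddef b hb]; exact le_of_lt ha'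
        · exact le_of_lt (ha'.trans (lt_of_le_of_lt (le_of_eq rfl) (hhighmem b hb)))
    have hdecomp : PySem.List.sorted xs (fun x => x) false
        = (PySem.List.sorted lows (fun x => x) false) ++
          (mids ++ (PySem.List.sorted highs (fun x => x) false)) :=
      PySem.List.sorted_id_eq_of_perm_of_pairwise xs _ hperm2 hpw
    have hlensum : lows.length + (mids.length + highs.length) = xs.length := by
      have := hperm.length_eq
      simpa using this
    have hLlen : (PySem.List.sorted lows (fun x => x) false).length = lows.length :=
      PySem.List.length_sorted lows (fun x => x) false
    have hHlen : (PySem.List.sorted highs (fun x => x) false).length = highs.length :=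
      PySem.List.length_sorted highs (fun x => x) false
    split_ifs with h1 h2
    · -- k < lows.length: recurse into lows
      rw [hdecomp, List.getD_append _ _ _ k (by rw [hLlen]; exact h1)]
      exact ih lows.length (by omega) lows k rfl h1
    · -- k ≥ xs.length - highs.length: recurse into highs
      rw [hdecomp, List.getD_append_right _ _ _ k (by rw [hLlen]; omega),
        List.getD_append_right _ _ _ _ (by omega)]
      have hk' : k - (xs.length - highs.length) < highs.length := by omega
      have := ih highs.length (by omega) highs (k - (xs.length - highs.length)) rfl hk'
      rw [this]
      congr 1
      omega
    · -- the middle: every element is the pivot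
      rw [hdecomp, List.getD_append_right _ _ _ k (by rw [hLlen]; omega),
        List.getD_append _ _ _ _ (by rw [hLlen]; omega)]
      have hj : k - (PySem.List.sorted lows (fun x => x) false).length < mids.length := by
        rw [hLlen]; omega
      rw [List.getD_eq_getElem mids 0 hj]
      exact (hmiddef _ (List.getElem_mem hj)).symm

-- the body of A equals the body of B on a nonempty key list
lemma body_eq (l : List Int) (hne : l ≠ []) :
    (match PySem.List.pyGet? (PySem.List.sorted l (fun x => x) false)
        (PySem.Int.floordiv (l.length : Int) 2) with
     | none => ([] : List Int)
     | some pivot => partAloop l pivot 0 0 l.length)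
      = partBloop l (kthSmallest l (l.length / 2)) 0 0 l.length := by
  have hlen : (PySem.List.sorted l (fun x => x) false).length = l.length :=
    PySem.List.length_sorted l (fun x => x) false
  have hsne : PySem.List.sorted l (fun x => x) false ≠ [] := by
    intro hcon
    apply hne
    have := congrArg List.length hcon
    rw [hlen] at this
    exact List.length_eq_zero_iff.mp this
  have hget := pyGet_half (PySem.List.sorted l (fun x => x) false) hsne
  rw [hlen] at hget
  rw [hget]
  have hk : l.length / 2 < l.length := by
    have : 0 < l.length := List.length_pos_iff.mpr hne
    omega
  rw [kth_eq l.length l (l.length / 2) rfl hk]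
  exact loops_eq (l.length - 0) l _ 0 0 l.length rfl

lemma dedup_keys_ne (d : List (Int × Int)) (hp : d ≠ []) :
    PySem.List.dedup (d.map (fun p => p.1)) ≠ [] := by
  cases d with
  | nil => exact absurd rfl hp
  | cons a t =>
    intro hcon
    have hm : a.1 ∈ PySem.List.dedup ((a :: t).map (fun p => p.1)) :=
      (PySem.List.mem_dedup _ _).mpr (by simp)
    rw [hcon] at hm
    simp at hm

-- ===== VERDICT (by name: the statement is the Claim_ definition above) =====
theorem partition_based_on_key_spec : Claim_equal_partition_based_on_key := by
  intro d _hd hp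
  unfold Spec_partition_based_on_key partition_based_on_key partition_based_on_key_alt
  exact body_eq (PySem.List.dedup (d.map (fun p => p.1))) (dedup_keys_ne d hp)
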